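-- pv_equiv track=rewrite | github.com/caseyot6/python | conway.py | add_conway_shape
-- ===== SOURCE A (Python) =====
-- def add_conway_shape(index, current_map, new_coord, width, height):
--
--     if index == 0:
--         glider = [(0,0), (-1,1),(1,0),(0,-1),(-1,-1)]
--         for i in glider:
--             x = i[0]+new_coord[0]
--             y = i[1]+new_coord[1]
--
--             if (x >= width):
--                 x = 0
--             elif(x < 0):
--                 x = width-1
--
--             if (y >= height):
--                 y = 0
--             elif(y < 0):
--                 y = height-1
--
--             current_map[(x,y)][0] = 1
--     elif index == 1:
--
--         hwss = [(0,1,0,0), (1,1,1,0), (1,0,1,1), (0,1,1,1), (0,1,1,1), (0,1,1,1), (0,1,1,0)]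
--         for i in range(0,len(hwss)):
--             k = 0
--             for j in hwss[i]:
--                 x = i + new_coord[0]
--                 y = k + new_coord[1]
--
--                 if (x >= width):
--                     x = 0
--                 elif(x < 0):
--                     x = width-1
--
--                 if (y >= height):
--                     y = 0
--                 elif(y < 0):
--                     y = height-1
--
--                 current_map[(x,y)][0] = j
--                 k += 1
--
--
--
--
--     elif index == 2:
--
--         mwss = [(0,1,0,0), (1,1,1,0), (1,0,1,1), (0,1,1,1), (0,1,1,1), (0,1,1,0)]
--         for i in range(0,len(mwss)):
--             k = 0
--             for j in mwss[i]:
--                 x = i + new_coord[0]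
--                 y = k + new_coord[1]
--
--                 if (x >= width):
--                     x = 0
--                 elif(x < 0):
--                     x = width-1
--
--                 if (y >= height):
--                     y = 0
--                 elif(y < 0):
--                     y = height-1
--
--                 current_map[(x,y)][0] = j
--                 k += 1
--     elif index == 3:
--
--         lwss = [(0,1,1,0), (0,1,1,1), (1,0,1,1), (1,1,1,0), (0,1,0,0)]
--         for i in range(0,len(lwss)):
--             k = 0
--             for j in lwss[i]:
--                 x = i + new_coord[0]
--                 y = k + new_coord[1]
--
--                 if (x >= width):
--                     x = 0
--                 elif(x < 0):
--                     x = width-1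
--
--                 if (y >= height):
--                     y = 0
--                 elif(y < 0):
--                     y = height-1
--
--                 current_map[(x,y)][0] = j
--                 k += 1
--
--     return current_map
-- ===== SOURCE B (Python) =====
-- # B never writes into current_map: it first folds all shape cells into an
-- # overlay dict keyed by the wrapped coordinate (later cells overwrite earlier
-- # ones, exactly like A's sequential writes), then rebuilds the map in one
-- # comprehension pass.  (Return value only: unlike A, B does not mutate
-- # current_map or its inner lists.)
--
-- _SHAPES = {
--     0: [(0, 0, 1), (-1, 1, 1), (1, 0, 1), (0, -1, 1), (-1, -1, 1)],
--     1: [(0, 0, 0), (0, 1, 1), (0, 2, 0), (0, 3, 0), (1, 0, 1), (1, 1, 1), (1, 2, 1), (1, 3, 0),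
--         (2, 0, 1), (2, 1, 0), (2, 2, 1), (2, 3, 1), (3, 0, 0), (3, 1, 1), (3, 2, 1), (3, 3, 1),
--         (4, 0, 0), (4, 1, 1), (4, 2, 1), (4, 3, 1), (5, 0, 0), (5, 1, 1), (5, 2, 1), (5, 3, 1),
--         (6, 0, 0), (6, 1, 1), (6, 2, 1), (6, 3, 0)],
--     2: [(0, 0, 0), (0, 1, 1), (0, 2, 0), (0, 3, 0), (1, 0, 1), (1, 1, 1), (1, 2, 1), (1, 3, 0),
--         (2, 0, 1), (2, 1, 0), (2, 2, 1), (2, 3, 1), (3, 0, 0), (3, 1, 1), (3, 2, 1), (3, 3, 1),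
--         (4, 0, 0), (4, 1, 1), (4, 2, 1), (4, 3, 1), (5, 0, 0), (5, 1, 1), (5, 2, 1), (5, 3, 0)],
--     3: [(0, 0, 0), (0, 1, 1), (0, 2, 1), (0, 3, 0), (1, 0, 0), (1, 1, 1), (1, 2, 1), (1, 3, 1),
--         (2, 0, 1), (2, 1, 0), (2, 2, 1), (2, 3, 1), (3, 0, 1), (3, 1, 1), (3, 2, 1), (3, 3, 0),
--         (4, 0, 0), (4, 1, 1), (4, 2, 0), (4, 3, 0)],
-- }
--
--
-- def add_conway_shape(index, current_map, new_coord, width, height):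
--     overlay = {}
--     for dx, dy, v in _SHAPES.get(index, []):
--         x = dx + new_coord[0]
--         y = dy + new_coord[1]
--         x = 0 if x >= width else width - 1 if x < 0 else x
--         y = 0 if y >= height else height - 1 if y < 0 else y
--         overlay[(x, y)] = v
--     return {key: [overlay[key]] + cell[1:] if key in overlay else cell
--             for key, cell in current_map.items()}
-- ===== Notes on version B (the rewrite author's own statement) =====
-- stated objective: alternative
-- what changed: A stamps the shape by sequentially mutating the map cell by cell with per-branch wrap logic; B never writes into the map: it folds all shape cells into an overlay dict of wrapped coordinates (last write wins) and rebuilds the map in a single comprehension pass over its items.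
-- outside the precondition, e.g. on add_conway_shape(0, {(0, 0): []}, (0, 0), 1, 1): A raises IndexError, B returns {(0, 0): [1]}
import Mathlib
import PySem

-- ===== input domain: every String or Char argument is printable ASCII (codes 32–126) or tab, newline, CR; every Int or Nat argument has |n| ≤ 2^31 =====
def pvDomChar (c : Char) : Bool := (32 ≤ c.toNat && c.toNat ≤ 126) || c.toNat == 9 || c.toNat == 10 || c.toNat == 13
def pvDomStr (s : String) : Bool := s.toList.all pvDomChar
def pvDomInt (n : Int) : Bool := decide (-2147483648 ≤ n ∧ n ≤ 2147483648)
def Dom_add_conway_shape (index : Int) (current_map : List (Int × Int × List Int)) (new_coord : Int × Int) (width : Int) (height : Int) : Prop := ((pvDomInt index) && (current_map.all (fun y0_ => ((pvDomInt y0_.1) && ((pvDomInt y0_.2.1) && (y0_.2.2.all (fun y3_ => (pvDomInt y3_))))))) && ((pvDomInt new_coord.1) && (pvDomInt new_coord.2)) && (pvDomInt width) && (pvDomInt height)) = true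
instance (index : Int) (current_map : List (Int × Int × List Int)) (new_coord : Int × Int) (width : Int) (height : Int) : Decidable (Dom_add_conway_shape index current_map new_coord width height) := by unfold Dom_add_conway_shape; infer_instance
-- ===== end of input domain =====

-- B replaces A's sequential cell-by-cell mutation of the map by an overlay dict of wrapped
-- coordinates (last write wins) applied in one rebuild pass over the map items — objective:
-- alternative.  Python A mutates current_map's inner lists in place while Python B builds a new
-- dict; the equivalence proved here is about the RETURN value only.

-- shared dict-write primitive: current_map[(x,y)][0] = v (exact where the key is present with a
-- nonempty list, which is what Pre_ demands; a Python dict cannot hold duplicate keys)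
def pvSet0 (m : List (Int × Int × List Int)) (x y v : Int) : List (Int × Int × List Int) :=
  m.map (fun e => if e.1 = x ∧ e.2.1 = y then (e.1, e.2.1, e.2.2.set 0 v) else e)

-- ===== PORT A =====
def add_conway_shape (index : Int) (current_map : List (Int × Int × List Int)) (new_coord : Int × Int) (width : Int) (height : Int) : List (Int × Int × List Int) :=
  if index = 0 then
    let glider : List (Int × Int) := [(0,0), (-1,1), (1,0), (0,-1), (-1,-1)]
    glider.foldl (fun m i =>
      let x := i.1 + new_coord.1
      let y := i.2 + new_coord.2
      let x := if x ≥ width then 0 else if x < 0 then width - 1 else x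
      let y := if y ≥ height then 0 else if y < 0 then height - 1 else y
      pvSet0 m x y 1) current_map
  else if index = 1 then
    let hwss : List (List Int) := [[0,1,0,0],[1,1,1,0],[1,0,1,1],[0,1,1,1],[0,1,1,1],[0,1,1,1],[0,1,1,0]]
    (PySem.List.pyRange 0 ((hwss.length : Int)) 1).foldl (fun m i =>
      ((PySem.List.pyGetD hwss i []).foldl (fun (s : List (Int × Int × List Int) × Int) j =>
        let x := i + new_coord.1
        let y := s.2 + new_coord.2
        let x := if x ≥ width then 0 else if x < 0 then width - 1 else x
        let y := if y ≥ height then 0 else if y < 0 then height - 1 else y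
        (pvSet0 s.1 x y j, s.2 + 1)) (m, 0)).1) current_map
  else if index = 2 then
    let mwss : List (List Int) := [[0,1,0,0],[1,1,1,0],[1,0,1,1],[0,1,1,1],[0,1,1,1],[0,1,1,0]]
    (PySem.List.pyRange 0 ((mwss.length : Int)) 1).foldl (fun m i =>
      ((PySem.List.pyGetD mwss i []).foldl (fun (s : List (Int × Int × List Int) × Int) j =>
        let x := i + new_coord.1
        let y := s.2 + new_coord.2
        let x := if x ≥ width then 0 else if x < 0 then width - 1 else x
        let y := if y ≥ height then 0 else if y < 0 then height - 1 else y
        (pvSet0 s.1 x y j, s.2 + 1)) (m, 0)).1) current_map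
  else if index = 3 then
    let lwss : List (List Int) := [[0,1,1,0],[0,1,1,1],[1,0,1,1],[1,1,1,0],[0,1,0,0]]
    (PySem.List.pyRange 0 ((lwss.length : Int)) 1).foldl (fun m i =>
      ((PySem.List.pyGetD lwss i []).foldl (fun (s : List (Int × Int × List Int) × Int) j =>
        let x := i + new_coord.1
        let y := s.2 + new_coord.2
        let x := if x ≥ width then 0 else if x < 0 then width - 1 else x
        let y := if y ≥ height then 0 else if y < 0 then height - 1 else y
        (pvSet0 s.1 x y j, s.2 + 1)) (m, 0)).1) current_map
  else current_map

-- ===== PORT B =====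
-- _SHAPES: flat (dx, dy, value) cell tables per shape index
def pvShapes : PySem.Dict Int (List (Int × Int × Int)) :=
  PySem.Dict.ofList [
    (0, [(0,0,1), (-1,1,1), (1,0,1), (0,-1,1), (-1,-1,1)]),
    (1, [(0,0,0),(0,1,1),(0,2,0),(0,3,0),(1,0,1),(1,1,1),(1,2,1),(1,3,0),
         (2,0,1),(2,1,0),(2,2,1),(2,3,1),(3,0,0),(3,1,1),(3,2,1),(3,3,1),
         (4,0,0),(4,1,1),(4,2,1),(4,3,1),(5,0,0),(5,1,1),(5,2,1),(5,3,1),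
         (6,0,0),(6,1,1),(6,2,1),(6,3,0)]),
    (2, [(0,0,0),(0,1,1),(0,2,0),(0,3,0),(1,0,1),(1,1,1),(1,2,1),(1,3,0),
         (2,0,1),(2,1,0),(2,2,1),(2,3,1),(3,0,0),(3,1,1),(3,2,1),(3,3,1),
         (4,0,0),(4,1,1),(4,2,1),(4,3,1),(5,0,0),(5,1,1),(5,2,1),(5,3,0)]),
    (3, [(0,0,0),(0,1,1),(0,2,1),(0,3,0),(1,0,0),(1,1,1),(1,2,1),(1,3,1),
         (2,0,1),(2,1,0),(2,2,1),(2,3,1),(3,0,1),(3,1,1),(3,2,1),(3,3,0),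
         (4,0,0),(4,1,1),(4,2,0),(4,3,0)])]

def add_conway_shape_alt (index : Int) (current_map : List (Int × Int × List Int)) (new_coord : Int × Int) (width : Int) (height : Int) : List (Int × Int × List Int) :=
  let overlay : PySem.Dict (Int × Int) Int :=
    (pvShapes.getD index []).foldl (fun d c =>
      let x := c.1 + new_coord.1
      let y := c.2.1 + new_coord.2
      let x := if x ≥ width then 0 else if x < 0 then width - 1 else x
      let y := if y ≥ height then 0 else if y < 0 then height - 1 else y
      d.insert (x, y) c.2.2) PySem.Dict.empty
  current_map.map (fun e =>
    match overlay.get? (e.1, e.2.1) with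
    | some v => (e.1, e.2.1, v :: PySem.List.slice e.2.2 (some 1) none)   -- [overlay[key]] + cell[1:]
    | none => e)

-- ===== PRECONDITION & SPEC =====
-- Python's wrap rule, and the list of (wrapped key, value) writes the shape performs
def pvClamp (c l : Int) : Int := if c ≥ l then 0 else if c < 0 then l - 1 else c

def pvWrites (index : Int) (new_coord : Int × Int) (width height : Int) : List ((Int × Int) × Int) :=
  (pvShapes.getD index []).map (fun c =>
    ((pvClamp (c.1 + new_coord.1) width, pvClamp (c.2.1 + new_coord.2) height), c.2.2))

-- Pre_ = exactly where Python A returns: every wrapped coordinate the shape writes to is a key of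
-- the map (else KeyError) and every map entry at a written key holds a nonempty list (else
-- IndexError on cell[0] = v).
def Pre_add_conway_shape (index : Int) (current_map : List (Int × Int × List Int)) (new_coord : Int × Int) (width : Int) (height : Int) : Prop :=
  (∀ kk ∈ (pvWrites index new_coord width height).map (·.1), ∃ e ∈ current_map, (e.1, e.2.1) = kk) ∧
  (∀ e ∈ current_map, (e.1, e.2.1) ∈ (pvWrites index new_coord width height).map (·.1) → e.2.2 ≠ [])
instance (index : Int) (current_map : List (Int × Int × List Int)) (new_coord : Int × Int) (width : Int) (height : Int) : Decidable (Pre_add_conway_shape index current_map new_coord width height) := by unfold Pre_add_conway_shape; infer_instance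

def pvWitness_add_conway_shape : Int × (List (Int × Int × List Int)) × (Int × Int) × Int × Int :=
  (0, [(0, 0, [9])], (0, 0), 1, 1)

def Spec_add_conway_shape (index : Int) (current_map : List (Int × Int × List Int)) (new_coord : Int × Int) (width : Int) (height : Int) (out : List (Int × Int × List Int)) : Prop := out = add_conway_shape_alt index current_map new_coord width height
instance (index : Int) (current_map : List (Int × Int × List Int)) (new_coord : Int × Int) (width : Int) (height : Int) (out : List (Int × Int × List Int)) : Decidable (Spec_add_conway_shape index current_map new_coord width height out) := by unfold Spec_add_conway_shape; infer_instance

-- ===== CLAIM =====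
def Claim_equal_add_conway_shape : Prop := ∀ (index : Int) (current_map : List (Int × Int × List Int)) (new_coord : Int × Int) (width : Int) (height : Int), Dom_add_conway_shape index current_map new_coord width height → Pre_add_conway_shape index current_map new_coord width height → Spec_add_conway_shape index current_map new_coord width height (add_conway_shape index current_map new_coord width height)

-- ===== LEMMAS AND PROOFS =====

-- per-entry effect of one write
def pvApplyOne (w : (Int × Int) × Int) (e : Int × Int × List Int) : Int × Int × List Int :=
  if e.1 = w.1.1 ∧ e.2.1 = w.1.2 then (e.1, e.2.1, e.2.2.set 0 w.2) else e

-- A's stamping as a fold of pvSet0 over a flat write list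
def pvStampA (ws : List ((Int × Int) × Int)) (m : List (Int × Int × List Int)) : List (Int × Int × List Int) :=
  ws.foldl (fun m w => pvSet0 m w.1.1 w.1.2 w.2) m

-- value of the LAST write at key k
def pvLastVal (ws : List ((Int × Int) × Int)) (k : Int × Int) : Option Int :=
  ws.foldl (fun acc w => if w.1 = k then some w.2 else acc) none

theorem pvStampA_eq_map (ws : List ((Int × Int) × Int)) (m : List (Int × Int × List Int)) :
    pvStampA ws m = m.map (fun e => ws.foldl (fun e w => pvApplyOne w e) e) := by
  induction ws generalizing m with
  | nil => simp [pvStampA]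
  | cons w ws ih =>
      have h1 : pvStampA (w :: ws) m = pvStampA ws (m.map (pvApplyOne w)) := rfl
      rw [h1, ih, List.map_map]
      rfl

theorem pvLastVal_acc (ws : List ((Int × Int) × Int)) (k : Int × Int) (a : Option Int) :
    ws.foldl (fun acc w => if w.1 = k then some w.2 else acc) a = (pvLastVal ws k).or a := by
  induction ws generalizing a with
  | nil => simp [pvLastVal]
  | cons w ws ih =>
      show ws.foldl _ (if w.1 = k then some w.2 else a) = (pvLastVal (w :: ws) k).or a
      have h2 : pvLastVal (w :: ws) k
          = ws.foldl (fun acc w => if w.1 = k then some w.2 else acc) (if w.1 = k then some w.2 else none) := rfl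
      rw [ih, h2, ih]
      by_cases hw : w.1 = k <;> simp [hw]

theorem pvDict_get?_foldl_insert (ws : List ((Int × Int) × Int)) (d : PySem.Dict (Int × Int) Int) (k : Int × Int) :
    (ws.foldl (fun d w => d.insert w.1 w.2) d).get? k = (pvLastVal ws k).or (d.get? k) := by
  induction ws generalizing d with
  | nil => simp [pvLastVal]
  | cons w ws ih =>
      show (ws.foldl _ (d.insert w.1 w.2)).get? k = (pvLastVal (w :: ws) k).or (d.get? k)
      have h2 : pvLastVal (w :: ws) k
          = ws.foldl (fun acc w => if w.1 = k then some w.2 else acc) (if w.1 = k then some w.2 else none) := rfl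
      rw [ih, h2, pvLastVal_acc, PySem.Dict.get?_insert, Option.or_assoc]
      by_cases hw : k = w.1
      · simp [hw]
      · have : w.1 ≠ k := fun h => hw h.symm
        simp [hw, this]

theorem pvFoldW_eq (ws : List ((Int × Int) × Int)) (e : Int × Int × List Int)
    (h : (e.1, e.2.1) ∈ ws.map (·.1) → e.2.2 ≠ []) :
    ws.foldl (fun e w => pvApplyOne w e) e
      = match pvLastVal ws (e.1, e.2.1) with
        | some v => (e.1, e.2.1, v :: e.2.2.tail)
        | none => e := by
  induction ws generalizing e with
  | nil => simp [pvLastVal]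
  | cons w ws ih =>
      have hlast : pvLastVal (w :: ws) (e.1, e.2.1)
          = (pvLastVal ws (e.1, e.2.1)).or (if w.1 = (e.1, e.2.1) then some w.2 else none) := by
        show ws.foldl _ (if w.1 = (e.1, e.2.1) then some w.2 else none) = _
        rw [pvLastVal_acc]
      show ws.foldl (fun e w => pvApplyOne w e) (pvApplyOne w e) = _
      by_cases hm : e.1 = w.1.1 ∧ e.2.1 = w.1.2
      · have hne : e.2.2 ≠ [] := h (by
          simp only [List.map_cons, List.mem_cons]
          exact Or.inl (by simp [hm.1, hm.2]))
        obtain ⟨a, t, hat⟩ := List.exists_cons_of_ne_nil hne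
        have happ : pvApplyOne w e = (e.1, e.2.1, w.2 :: t) := by
          simp [pvApplyOne, hm, hat]
        rw [happ, ih _ (by intro _; simp)]
        have hk : w.1 = (e.1, e.2.1) := by
          cases w with | mk wk wv => cases wk with | mk wx wy =>
            simp_all
        rw [hlast, hk]
        cases hv : pvLastVal ws (e.1, e.2.1) <;> simp [hat]
      · have happ : pvApplyOne w e = e := by simp [pvApplyOne, hm]
        have hk : w.1 ≠ (e.1, e.2.1) := fun hw =>
          hm ⟨(congrArg Prod.fst hw).symm, (congrArg Prod.snd hw).symm⟩
        rw [happ, ih _ (fun hmem => h (by simp only [List.map_cons, List.mem_cons]; exact Or.inr hmem))]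
        rw [hlast]
        simp [hk]

-- main bridge: the sequential stamping equals the overlay rebuild
theorem pvStampA_eq_overlay (ws : List ((Int × Int) × Int)) (m : List (Int × Int × List Int))
    (h : ∀ e ∈ m, (e.1, e.2.1) ∈ ws.map (·.1) → e.2.2 ≠ []) :
    pvStampA ws m
      = m.map (fun e =>
          match (ws.foldl (fun d w => d.insert w.1 w.2) (PySem.Dict.empty : PySem.Dict (Int × Int) Int)).get? (e.1, e.2.1) with
          | some v => (e.1, e.2.1, v :: e.2.2.tail)
          | none => e) := by
  rw [pvStampA_eq_map]
  apply List.map_congr_left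
  intro e he
  rw [pvFoldW_eq ws e (h e he), pvDict_get?_foldl_insert]
  simp

theorem pvAlt_eq_overlay (index : Int) (m : List (Int × Int × List Int)) (nc : Int × Int) (w h : Int) :
    add_conway_shape_alt index m nc w h
      = m.map (fun e =>
          match ((pvWrites index nc w h).foldl (fun d w => d.insert w.1 w.2) (PySem.Dict.empty : PySem.Dict (Int × Int) Int)).get? (e.1, e.2.1) with
          | some v => (e.1, e.2.1, v :: e.2.2.tail)
          | none => e) := by
  unfold add_conway_shape_alt pvWrites
  rw [List.foldl_map]
  apply List.map_congr_left
  intro e _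
  simp only [pvClamp, PySem.List.slice_from_one]

set_option maxHeartbeats 2000000 in
theorem pvA_eq_stampA (index : Int) (m : List (Int × Int × List Int)) (nc : Int × Int) (w h : Int) :
    add_conway_shape index m nc w h = pvStampA (pvWrites index nc w h) m := by
  by_cases h0 : index = 0
  · subst h0
    have hsh : pvShapes.getD 0 [] = [(0,0,1), (-1,1,1), (1,0,1), (0,-1,1), (-1,-1,1)] := by decide
    simp [add_conway_shape, pvStampA, pvWrites, hsh, pvClamp]
  · by_cases h1 : index = 1
    · subst h1
      have hsh : pvShapes.getD 1 [] = [((0:Int),(0:Int),(0:Int)),(0,1,1),(0,2,0),(0,3,0),(1,0,1),(1,1,1),(1,2,1),(1,3,0),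
         (2,0,1),(2,1,0),(2,2,1),(2,3,1),(3,0,0),(3,1,1),(3,2,1),(3,3,1),
         (4,0,0),(4,1,1),(4,2,1),(4,3,1),(5,0,0),(5,1,1),(5,2,1),(5,3,1),
         (6,0,0),(6,1,1),(6,2,1),(6,3,0)] := by decide
      have hr : PySem.List.pyRange 0 (7:Int) 1 = [0,1,2,3,4,5,6] := by decide
      simp [add_conway_shape, pvStampA, pvWrites, hsh, hr, pvClamp,
            PySem.List.pyGetD, PySem.List.pyGet?, PySem.List.pyIdx?]
    · by_cases h2 : index = 2
      · subst h2
        have hsh : pvShapes.getD 2 [] = [((0:Int),(0:Int),(0:Int)),(0,1,1),(0,2,0),(0,3,0),(1,0,1),(1,1,1),(1,2,1),(1,3,0),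
           (2,0,1),(2,1,0),(2,2,1),(2,3,1),(3,0,0),(3,1,1),(3,2,1),(3,3,1),
           (4,0,0),(4,1,1),(4,2,1),(4,3,1),(5,0,0),(5,1,1),(5,2,1),(5,3,0)] := by decide
        have hr : PySem.List.pyRange 0 (6:Int) 1 = [0,1,2,3,4,5] := by decide
        simp [add_conway_shape, pvStampA, pvWrites, hsh, hr, pvClamp,
              PySem.List.pyGetD, PySem.List.pyGet?, PySem.List.pyIdx?]
      · by_cases h3 : index = 3
        · subst h3
          have hsh : pvShapes.getD 3 [] = [((0:Int),(0:Int),(0:Int)),(0,1,1),(0,2,1),(0,3,0),(1,0,0),(1,1,1),(1,2,1),(1,3,1),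
             (2,0,1),(2,1,0),(2,2,1),(2,3,1),(3,0,1),(3,1,1),(3,2,1),(3,3,0),
             (4,0,0),(4,1,1),(4,2,0),(4,3,0)] := by decide
          have hr : PySem.List.pyRange 0 (5:Int) 1 = [0,1,2,3,4] := by decide
          simp [add_conway_shape, pvStampA, pvWrites, hsh, hr, pvClamp,
                PySem.List.pyGetD, PySem.List.pyGet?, PySem.List.pyIdx?]
        · have hmk : pvShapes = (⟨[(0, [(0,0,1), (-1,1,1), (1,0,1), (0,-1,1), (-1,-1,1)]),
              (1, [(0,0,0),(0,1,1),(0,2,0),(0,3,0),(1,0,1),(1,1,1),(1,2,1),(1,3,0),(2,0,1),(2,1,0),(2,2,1),(2,3,1),(3,0,0),(3,1,1),(3,2,1),(3,3,1),(4,0,0),(4,1,1),(4,2,1),(4,3,1),(5,0,0),(5,1,1),(5,2,1),(5,3,1),(6,0,0),(6,1,1),(6,2,1),(6,3,0)]),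
              (2, [(0,0,0),(0,1,1),(0,2,0),(0,3,0),(1,0,1),(1,1,1),(1,2,1),(1,3,0),(2,0,1),(2,1,0),(2,2,1),(2,3,1),(3,0,0),(3,1,1),(3,2,1),(3,3,1),(4,0,0),(4,1,1),(4,2,1),(4,3,1),(5,0,0),(5,1,1),(5,2,1),(5,3,0)]),
              (3, [(0,0,0),(0,1,1),(0,2,1),(0,3,0),(1,0,0),(1,1,1),(1,2,1),(1,3,1),(2,0,1),(2,1,0),(2,2,1),(2,3,1),(3,0,1),(3,1,1),(3,2,1),(3,3,0),(4,0,0),(4,1,1),(4,2,0),(4,3,0)])]⟩ : PySem.Dict Int (List (Int × Int × Int))) := by decide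
          have h0' : ¬((0:Int) = index) := fun e => h0 e.symm
          have h1' : ¬((1:Int) = index) := fun e => h1 e.symm
          have h2' : ¬((2:Int) = index) := fun e => h2 e.symm
          have h3' : ¬((3:Int) = index) := fun e => h3 e.symm
          have hsh : pvShapes.getD index [] = [] := by
            rw [hmk]
            simp [PySem.Dict.getD_eq_get?_getD, PySem.Dict.get?_mk_cons, PySem.Dict.get?,
                  h0', h1', h2', h3']
          simp [add_conway_shape, h0, h1, h2, h3, pvWrites, hsh, pvStampA]

-- ===== VERDICT =====
theorem add_conway_shape_spec : Claim_equal_add_conway_shape := by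
  intro index m nc w h _ hpre
  unfold Spec_add_conway_shape
  rw [pvA_eq_stampA, pvAlt_eq_overlay]
  exact pvStampA_eq_overlay _ _ hpre.2
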